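-- pv_equiv track=rewrite | github.com/Hackathonv2/La-Quete-de-la-FiabiliteT3 | ex1.py | second_string
-- ===== SOURCE A (Python) =====
-- def second_string(string):
--     i = 0
--     second = []
--     while (string[i] != '\n'):
--         i += 1
--     i += 1
--     while (i < len(string)):
--         second.append(string[i])
--         i += 1
--     return second
-- ===== SOURCE B (Python) =====
-- def second_string(string):
--     return list(string.split('\n', 1)[1])
-- ===== Notes on version B (the rewrite author's own statement) =====
-- stated objective: idiomatic
-- what changed: Replaces the manual index scan for the first newline and the char-by-char appending loop with split('\n', 1)[1] materialized via list().
import Mathlib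
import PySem

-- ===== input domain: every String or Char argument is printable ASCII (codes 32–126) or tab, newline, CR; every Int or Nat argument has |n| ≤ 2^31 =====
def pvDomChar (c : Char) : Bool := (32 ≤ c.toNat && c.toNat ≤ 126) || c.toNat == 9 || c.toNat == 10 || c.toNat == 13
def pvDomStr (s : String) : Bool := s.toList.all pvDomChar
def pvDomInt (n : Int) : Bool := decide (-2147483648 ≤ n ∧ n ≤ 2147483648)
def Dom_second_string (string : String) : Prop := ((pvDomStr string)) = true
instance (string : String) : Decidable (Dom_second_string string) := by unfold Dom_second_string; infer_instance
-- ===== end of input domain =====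

-- B replaces A's manual newline scan and appending loop with split('\n',1)[1] turned into a char list (idiomatic; same cost).

-- ===== PORT A =====
-- A's first while loop: advance i until string[i] = '\n' (IndexError — excluded by Pre_ —
-- if none exists; then this helper returns having consumed everything), leaving the suffix
-- after that newline.
def secondSkipA : List Char → List Char
  | [] => []
  | c :: rest => if c = '\n' then rest else secondSkipA rest

def second_string (string : String) : List String :=
  -- A's second while loop: append string[i] (a 1-char str) for each remaining index.
  (secondSkipA string.toList).foldl (fun acc c => acc ++ [Char.toString c]) []

-- ===== PORT B =====
def second_string_alt (string : String) : List String :=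
  match PySem.Str.splitMax? string "\n" 1 with
  | some parts =>
    match PySem.List.pyGet? parts 1 with
    | some t => t.toList.map Char.toString   -- list(t)
    | none => []   -- IndexError: no newline in string; excluded by Pre_
  | none => []     -- unreachable: the separator "\n" is non-empty

-- ===== PRECONDITION & SPEC =====
-- Pre_ excludes exactly the strings without a newline, on which A's first loop runs off the
-- end and raises IndexError (B's [1] raises IndexError there too).
def Pre_second_string (string : String) : Prop := '\n' ∈ string.toList
instance (string : String) : Decidable (Pre_second_string string) := by unfold Pre_second_string; infer_instance
def pvWitness_second_string : String := "ab\ncd"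

def Spec_second_string (string : String) (out : List String) : Prop := out = second_string_alt string
instance (string : String) (out : List String) : Decidable (Spec_second_string string out) := by unfold Spec_second_string; infer_instance

-- ===== CLAIM (what is proved, stated in full; the proofs are below) =====
def Claim_equal_second_string : Prop := ∀ (string : String), Dom_second_string string → Pre_second_string string → Spec_second_string string (second_string string)

-- ===== LEMMAS AND PROOFS =====

lemma foldl_append_toString (l : List Char) (a : List String) :
    l.foldl (fun acc c => acc ++ [Char.toString c]) a = a ++ l.map Char.toString := by
  induction l generalizing a with
  | nil => simp
  | cons c rest ih => rw [List.foldl_cons, ih, List.map_cons, List.append_assoc]; rfl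

lemma secondSkipA_eq (l : List Char) :
    secondSkipA l = (l.dropWhile (· ≠ '\n')).tail := by
  induction l with
  | nil => simp [secondSkipA]
  | cons c rest ih =>
    by_cases h : c = '\n' <;> simp [secondSkipA, List.dropWhile, h, ih]
lemma splitOnMax_go_zero (sep : List Char) (fuel : Nat) (l cur : List Char)
    (acc : List (List Char)) :
    PySem.Chars.splitOnMax.go sep fuel 0 l cur acc = ((cur.reverse ++ l) :: acc).reverse := by
  cases fuel <;> cases l <;> simp [PySem.Chars.splitOnMax.go]

lemma splitOnMax_go_one (l : List Char) (fuel : Nat) (cur : List Char) (acc : List (List Char))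
    (hf : l.length < fuel) :
    PySem.Chars.splitOnMax.go ['\n'] fuel 1 l cur acc =
      (if '\n' ∈ l
       then ((cur.reverse ++ l.takeWhile (· ≠ '\n')) :: acc).reverse ++ [(l.dropWhile (· ≠ '\n')).tail]
       else ((cur.reverse ++ l) :: acc).reverse) := by
  induction l generalizing fuel cur acc with
  | nil =>
    cases fuel with
    | zero => omega
    | succ f => simp [PySem.Chars.splitOnMax.go]
  | cons c rest ih =>
    cases fuel with
    | zero => omega
    | succ f =>
      by_cases h : c = '\n'
      · subst h
        rw [show PySem.Chars.splitOnMax.go ['\n'] (f+1) 1 ('\n' :: rest) cur acc =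
              PySem.Chars.splitOnMax.go ['\n'] f 0 rest [] (cur.reverse :: acc) by
            simp [PySem.Chars.splitOnMax.go, List.isPrefixOf]]
        rw [splitOnMax_go_zero]
        simp [List.takeWhile, List.dropWhile]
      · have h' : ¬ '\n' = c := fun e => h e.symm
        have hrest : rest.length < f := by simpa using Nat.lt_of_succ_lt_succ hf
        have hpre : (['\n'].isPrefixOf (c :: rest)) = false := by
          simp [List.isPrefixOf, h']
        rw [show PySem.Chars.splitOnMax.go ['\n'] (f+1) 1 (c :: rest) cur acc =
              PySem.Chars.splitOnMax.go ['\n'] f 1 rest (c :: cur) acc by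
            simp [PySem.Chars.splitOnMax.go, hpre]]
        rw [ih f (c :: cur) acc hrest]
        by_cases hm : '\n' ∈ rest <;>
          simp [hm, h, h', List.takeWhile, List.dropWhile, List.mem_cons]

lemma splitMax?_newline (s : String) :
    PySem.Str.splitMax? s "\n" 1 =
      some (if '\n' ∈ s.toList
            then [String.ofList (s.toList.takeWhile (· ≠ '\n')),
                  String.ofList ((s.toList.dropWhile (· ≠ '\n')).tail)]
            else [String.ofList s.toList]) := by
  have hgo := splitOnMax_go_one s.toList (s.toList.length + 1) [] [] (Nat.lt_succ_self _)
  unfold PySem.Str.splitMax? PySem.Chars.splitMax? PySem.Chars.splitOnMax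
  rw [show ("\n".toList) = ['\n'] from rfl]
  rw [if_neg (by decide), if_neg (by decide)]
  rw [show ((1:Int).toNat) = 1 from rfl]
  rw [hgo]
  by_cases hm : '\n' ∈ s.toList <;> simp [hm]



-- ===== VERDICT (by name: the statement is the Claim_ definition above) =====
theorem second_string_spec : Claim_equal_second_string := by
  intro s _hDom hPre
  unfold Spec_second_string second_string second_string_alt
  rw [splitMax?_newline s, if_pos (show '\n' ∈ s.toList from hPre),
      secondSkipA_eq, foldl_append_toString]
  norm_num [PySem.List.pyGet?, PySem.List.pyIdx?]
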